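-- pv_equiv track=rewrite | github.com/fredriklindblad/bd_agent | analyze_agent/resolve_ticker_tool.py | _best_ticker
-- ===== SOURCE A (Python) =====
-- from typing import Dict, List, Tuple
--
-- def _best_ticker(query: str, instruments: List[Dict[str, str]]) -> str:
--     q = (query or "").strip().lower()
--     best: Tuple[int, str] = (0, "")
--     for it in instruments:
--         name = (it.get("name") or "").lower()
--         ticker = (it.get("ticker") or "").lower()
--         score = (
--             100
--             if q in (name, ticker)
--             else 85
--             if q in name
--             else 75
--             if name.startswith(q) or ticker.startswith(q)
--             else 0
--         )
--         if score > best[0]: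
--             best = (score, it.get("ticker") or "")
--         if best[0] == 100:
--             break
--     return best[1]
-- ===== SOURCE B (Python) =====
-- def _best_ticker(query, instruments):
--     q = (query or "").strip().lower()
--
--     def _name(it):
--         return (it.get("name") or "").lower()
--
--     def _tick(it):
--         return (it.get("ticker") or "").lower()
--
--     # Pass 1: exact equality with name or ticker (score-100 tier).
--     for it in instruments:
--         if q == _name(it) or q == _tick(it):
--             return it.get("ticker") or ""
--     # Pass 2: substring of name (score-85 tier).
--     for it in instruments:
--         if q in _name(it):
--             return it.get("ticker") or ""
--     # Pass 3: prefix of name or ticker (score-75 tier).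
--     for it in instruments:
--         if _name(it).startswith(q) or _tick(it).startswith(q):
--             return it.get("ticker") or ""
--     return ""
-- ===== Notes on version B (the rewrite author's own statement) =====
-- stated objective: alternative
-- what changed: Replaces the single max-tracking scored pass (with break at 100) by three priority-ordered scans that return the first exact-equality match, else the first name-substring match, else the first prefix match, else "".
import Mathlib
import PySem

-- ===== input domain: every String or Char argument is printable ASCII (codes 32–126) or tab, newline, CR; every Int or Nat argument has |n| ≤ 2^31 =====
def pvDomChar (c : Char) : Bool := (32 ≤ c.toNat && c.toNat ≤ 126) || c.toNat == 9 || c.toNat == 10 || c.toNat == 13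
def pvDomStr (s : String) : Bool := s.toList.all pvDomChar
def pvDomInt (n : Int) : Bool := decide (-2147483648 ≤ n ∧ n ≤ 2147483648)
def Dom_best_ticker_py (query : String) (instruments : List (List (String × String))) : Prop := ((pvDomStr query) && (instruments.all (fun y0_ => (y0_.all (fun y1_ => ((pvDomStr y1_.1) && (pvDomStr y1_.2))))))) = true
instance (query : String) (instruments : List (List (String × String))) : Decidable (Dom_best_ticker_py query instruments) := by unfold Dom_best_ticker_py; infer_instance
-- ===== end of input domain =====

-- B replaces A's single max-tracking scored pass by three priority-ordered scans (equality, then name-substring, then prefix); same O(n) cost, different decomposition.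
-- ===== PORT A =====
-- `it.get(k) or ""`: first-match assoc lookup, None (and "") become ""
def pvGet (it : List (String × String)) (k : String) : String :=
  match it.find? (fun p => p.1 == k) with
  | some p => p.2
  | none => ""

-- the for-loop of A: state `best : (score, ticker)`, early break once best score is 100
def pvBestLoop (q : String) (best : Int × String) : List (List (String × String)) → String
  | [] => best.2
  | it :: rest =>
    let name := PySem.Str.lower (pvGet it "name")
    let ticker := PySem.Str.lower (pvGet it "ticker")
    let score : Int :=
      if q == name || q == ticker then 100
      else if PySem.Str.isIn q name then 85
      else if PySem.Str.startswith name q || PySem.Str.startswith ticker q then 75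
      else 0
    let best' := if score > best.1 then (score, pvGet it "ticker") else best
    if best'.1 == 100 then best'.2 else pvBestLoop q best' rest

def best_ticker_py (query : String) (instruments : List (List (String × String))) : String :=
  pvBestLoop (PySem.Str.lower (PySem.Str.strip query)) (0, "") instruments

-- ===== PORT B =====
-- three priority-ordered scans: exact equality, then name-substring, then prefix
def best_ticker_py_alt (query : String) (instruments : List (List (String × String))) : String :=
  let q := PySem.Str.lower (PySem.Str.strip query)
  match instruments.find? (fun it =>
      q == PySem.Str.lower (pvGet it "name") || q == PySem.Str.lower (pvGet it "ticker")) with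
  | some it => pvGet it "ticker"
  | none =>
    match instruments.find? (fun it => PySem.Str.isIn q (PySem.Str.lower (pvGet it "name"))) with
    | some it => pvGet it "ticker"
    | none =>
      match instruments.find? (fun it =>
          PySem.Str.startswith (PySem.Str.lower (pvGet it "name")) q
          || PySem.Str.startswith (PySem.Str.lower (pvGet it "ticker")) q) with
      | some it => pvGet it "ticker"
      | none => ""

-- ===== PRECONDITION & SPEC =====
def Spec_best_ticker_py (query : String) (instruments : List (List (String × String))) (out : String) : Prop := out = best_ticker_py_alt query instruments
instance (query : String) (instruments : List (List (String × String))) (out : String) : Decidable (Spec_best_ticker_py query instruments out) := by unfold Spec_best_ticker_py; infer_instance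

-- ===== CLAIM (what is proved, stated in full; the proofs are below) =====
def Claim_equal_best_ticker_py : Prop := ∀ (query : String) (instruments : List (List (String × String))), Dom_best_ticker_py query instruments → Spec_best_ticker_py query instruments (best_ticker_py query instruments)

-- ===== LEMMAS AND PROOFS =====
-- predicates of the three tiers
def pvP1 (q : String) (it : List (String × String)) : Bool :=
  q == PySem.Str.lower (pvGet it "name") || q == PySem.Str.lower (pvGet it "ticker")
def pvP2 (q : String) (it : List (String × String)) : Bool :=
  PySem.Str.isIn q (PySem.Str.lower (pvGet it "name"))
def pvP3 (q : String) (it : List (String × String)) : Bool :=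
  PySem.Str.startswith (PySem.Str.lower (pvGet it "name")) q
  || PySem.Str.startswith (PySem.Str.lower (pvGet it "ticker")) q

-- characterisation of A's loop for any sub-100 best score reachable by the loop
theorem pvBestLoop_char (q : String) (l : List (List (String × String)))
    (s : Int) (t : String) (hs : s = 0 ∨ s = 75 ∨ s = 85) :
    pvBestLoop q (s, t) l =
      (match l.find? (pvP1 q) with
       | some it => pvGet it "ticker"
       | none =>
         if 85 ≤ s then t else
         match l.find? (pvP2 q) with
         | some it => pvGet it "ticker"
         | none =>
           if 75 ≤ s then t else
           match l.find? (pvP3 q) with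
           | some it => pvGet it "ticker"
           | none => t) := by
  induction l generalizing s t with
  | nil =>
    simp only [pvBestLoop, List.find?]
    rcases hs with h | h | h <;> subst h <;> norm_num
  | cons it rest ih =>
    simp only [pvBestLoop, List.find?]
    by_cases h1 : pvP1 q it = true
    · have h1' : (q == PySem.Str.lower (pvGet it "name")
          || q == PySem.Str.lower (pvGet it "ticker")) = true := h1
      have hlt : (100 : Int) > s := by rcases hs with h | h | h <;> subst h <;> norm_num
      simp [h1', h1, hlt]
    · have h1' : (q == PySem.Str.lower (pvGet it "name")
          || q == PySem.Str.lower (pvGet it "ticker")) = false := by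
        simpa [pvP1] using h1
      by_cases h2 : pvP2 q it = true
      · have h2' : PySem.Str.isIn q (PySem.Str.lower (pvGet it "name")) = true := h2
        rcases hs with h | h | h <;> subst h
        · -- s = 0 : 85 > 0, best becomes (85, tick it)
          simp only [h1', h2', h1, h2, Bool.false_eq_true, if_false, if_true,
            show ((85:Int) > 0) = True by norm_num]
          rw [ih 85 (pvGet it "ticker") (Or.inr (Or.inr rfl))]
          simp
        · simp only [h1', h2', h1, h2, Bool.false_eq_true, if_false, if_true,
            show ((85:Int) > 75) = True by norm_num]
          rw [ih 85 (pvGet it "ticker") (Or.inr (Or.inr rfl))]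
          simp
        · simp only [h1', h2', h1, h2, Bool.false_eq_true, if_false, if_true,
            show ¬ ((85:Int) > 85) by norm_num]
          rw [ih 85 t (Or.inr (Or.inr rfl))]
          simp
      · have h2' : PySem.Str.isIn q (PySem.Str.lower (pvGet it "name")) = false := by
          simpa [pvP2] using h2
        by_cases h3 : pvP3 q it = true
        · have h3' : (PySem.Str.startswith (PySem.Str.lower (pvGet it "name")) q
              || PySem.Str.startswith (PySem.Str.lower (pvGet it "ticker")) q) = true := h3
          rcases hs with h | h | h <;> subst h
          · simp only [h1', h2', h3', h1, h2, h3, Bool.false_eq_true, if_false, if_true,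
              show ((75:Int) > 0) = True by norm_num]
            rw [ih 75 (pvGet it "ticker") (Or.inr (Or.inl rfl))]
            simp
          · simp only [h1', h2', h3', h1, h2, h3, Bool.false_eq_true, if_false, if_true,
              show ¬ ((75:Int) > 75) by norm_num]
            rw [ih 75 t (Or.inr (Or.inl rfl))]
            simp
          · simp only [h1', h2', h3', h1, h2, h3, Bool.false_eq_true, if_false, if_true,
              show ¬ ((75:Int) > 85) by norm_num]
            rw [ih 85 t (Or.inr (Or.inr rfl))]
            simp
        · have h3' : (PySem.Str.startswith (PySem.Str.lower (pvGet it "name")) q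
              || PySem.Str.startswith (PySem.Str.lower (pvGet it "ticker")) q) = false := by
            simpa [pvP3] using h3
          have hnlt : ¬ ((0:Int) > s) := by rcases hs with h | h | h <;> subst h <;> norm_num
          have hne : (s == (100:Int)) = false := by
            rcases hs with h | h | h <;> subst h <;> decide
          simp only [h1', h2', h3', h1, h2, h3, Bool.false_eq_true, if_false, hnlt, hne]
          exact ih s t hs

-- ===== VERDICT (by name: the statement is the Claim_ definition above) =====
theorem best_ticker_py_spec : Claim_equal_best_ticker_py := by
  intro query instruments _
  unfold Spec_best_ticker_py best_ticker_py best_ticker_py_alt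
  rw [pvBestLoop_char _ _ 0 "" (Or.inl rfl)]
  rfl
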